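-- pv_equiv track=rewrite | github.com/Shreyash170304/CAN-Based-Data-Logger-A-Complete-Data-Acquisition-Device- | CAN_Data_Decoder/CAN_Data_Decoder_New.py | _extract_raw_signal
-- ===== SOURCE A (Python) =====
-- def _extract_raw_signal(data_bytes, start_bit, length, byte_order):
--     """Extract raw signal bits from data bytes for both endian types."""
--     if length <= 0:
--         return 0
--     raw = 0
--     if byte_order == "little_endian":
--         for i in range(length):
--             bit_index = start_bit + i
--             byte_index = bit_index // 8
--             bit_in_byte = bit_index % 8
--             if byte_index >= len(data_bytes):
--                 break
--             bit = (data_bytes[byte_index] >> bit_in_byte) & 0x1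
--             raw |= (bit << i)
--     else:
--         # big_endian / Motorola
--         for i in range(length):
--             bit_index = start_bit - i
--             byte_index = bit_index // 8
--             bit_in_byte = bit_index % 8
--             if byte_index < 0 or byte_index >= len(data_bytes):
--                 break
--             bit = (data_bytes[byte_index] >> bit_in_byte) & 0x1
--             raw = (raw << 1) | bit
--     return raw
-- ===== SOURCE B (Python) =====
-- def _extract_raw_signal(data_bytes, start_bit, length, byte_order):
--     """Byte-wise extraction: consume whole bit-chunks per byte instead of single bits."""
--     if length <= 0:
--         return 0
--     n = len(data_bytes)
--     raw = 0
--     if byte_order == "little_endian":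
--         lo, rem, pos = start_bit, length, 0
--         while rem > 0:
--             b = lo // 8
--             if b >= n:
--                 break
--             off = lo % 8
--             take = min(8 - off, rem)
--             chunk = (data_bytes[b] // (1 << off)) % (1 << take)
--             raw += chunk * (1 << pos)
--             lo += take
--             rem -= take
--             pos += take
--     else:
--         hi, rem = start_bit, length
--         while rem > 0:
--             b = hi // 8
--             if b < 0 or b >= n:
--                 break
--             off = hi % 8
--             take = min(off + 1, rem)
--             chunk = (data_bytes[b] // (1 << (off - take + 1))) % (1 << take)
--             raw = raw * (1 << take) + chunk
--             hi -= take
--             rem -= take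
--     return raw
-- ===== Notes on version B (the rewrite author's own statement) =====
-- stated objective: faster
-- what changed: A scans one bit per iteration (8 iterations per byte, each with its own floor-division, shift and single-bit OR); B walks the touched bytes once, extracting each byte's whole bit-slice with one floor-division/modulus and combining the slices arithmetically, with the same break conditions.
import Mathlib
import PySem

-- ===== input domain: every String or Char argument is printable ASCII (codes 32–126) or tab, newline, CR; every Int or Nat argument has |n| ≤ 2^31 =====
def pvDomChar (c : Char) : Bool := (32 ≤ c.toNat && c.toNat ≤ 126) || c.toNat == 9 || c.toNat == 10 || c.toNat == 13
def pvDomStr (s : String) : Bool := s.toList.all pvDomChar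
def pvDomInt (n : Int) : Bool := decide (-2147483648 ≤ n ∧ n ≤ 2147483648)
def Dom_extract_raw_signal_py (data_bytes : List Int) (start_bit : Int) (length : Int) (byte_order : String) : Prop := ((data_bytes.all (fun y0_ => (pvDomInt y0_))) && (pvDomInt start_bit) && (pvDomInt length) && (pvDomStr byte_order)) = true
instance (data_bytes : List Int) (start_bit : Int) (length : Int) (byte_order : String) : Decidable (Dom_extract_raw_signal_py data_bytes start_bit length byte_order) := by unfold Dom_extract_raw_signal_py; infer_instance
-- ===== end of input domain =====

-- B replaces A's bit-by-bit loops by byte-wise loops that extract a whole bit-chunk of each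
-- touched byte with floor-division/modulus arithmetic (objective: faster by a constant factor,
-- measured).

-- ===== PORT A =====
-- for i in range(length) with break, little_endian branch; fuel = remaining iterations, i = loop index
def pvLE_A (d : List Int) (s : Int) : Nat → Nat → Int → Int
  | 0, _, raw => raw
  | n+1, i, raw =>
    let bit_index : Int := s + (i : Int)
    let byte_index : Int := PySem.Int.floordiv bit_index 8
    let bit_in_byte : Int := PySem.Int.mod bit_index 8
    if (d.length : Int) ≤ byte_index then raw
    else
      -- Pre_ guarantees data_bytes[byte_index] does not raise; pyGetD's default is never read there
      let bit : Int := PySem.Int.band ((PySem.List.pyGetD d byte_index 0) >>> bit_in_byte.toNat) 1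
      pvLE_A d s n (i+1) (PySem.Int.bor raw (bit <<< i))

-- big_endian branch
def pvBE_A (d : List Int) (s : Int) : Nat → Nat → Int → Int
  | 0, _, raw => raw
  | n+1, i, raw =>
    let bit_index : Int := s - (i : Int)
    let byte_index : Int := PySem.Int.floordiv bit_index 8
    let bit_in_byte : Int := PySem.Int.mod bit_index 8
    if byte_index < 0 ∨ (d.length : Int) ≤ byte_index then raw
    else
      let bit : Int := PySem.Int.band ((PySem.List.pyGetD d byte_index 0) >>> bit_in_byte.toNat) 1
      pvBE_A d s n (i+1) (PySem.Int.bor (raw <<< (1:Nat)) bit)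

def extract_raw_signal_py (data_bytes : List Int) (start_bit : Int) (length : Int) (byte_order : String) : Int :=
  if length ≤ 0 then 0
  else if byte_order = "little_endian" then pvLE_A data_bytes start_bit length.toNat 0 0
  else pvBE_A data_bytes start_bit length.toNat 0 0

-- ===== PORT B =====
-- while rem > 0 loop over touched bytes, little_endian: state (lo, rem, pos, raw)
def pvLE_B (d : List Int) : Int → Nat → Nat → Int → Int
  | _, 0, _, raw => raw
  | lo, r+1, pos, raw =>
    let b : Int := PySem.Int.floordiv lo 8
    if (d.length : Int) ≤ b then raw
    else
      let off : Nat := (PySem.Int.mod lo 8).toNat    -- lo % 8 ∈ [0,8), exact as Nat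
      let take : Nat := min (8 - off) (r+1)
      let chunk : Int := PySem.Int.mod (PySem.Int.floordiv (PySem.List.pyGetD d b 0) ((1:Int) <<< off)) ((1:Int) <<< take)
      pvLE_B d (lo + (take : Int)) (r+1-take) (pos+take) (raw + chunk * ((1:Int) <<< pos))
  termination_by _ r _ _ => r
  decreasing_by
    have h1 := PySem.Int.mod_lt lo (b := 8) (by norm_num)
    have h2 := PySem.Int.mod_nonneg lo (b := 8) (by norm_num)
    omega

-- big_endian: state (hi, rem, raw); Python's (off - take + 1) is the Nat (off + 1 - take), take ≤ off+1
def pvBE_B (d : List Int) : Int → Nat → Int → Int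
  | _, 0, raw => raw
  | hi, r+1, raw =>
    let b : Int := PySem.Int.floordiv hi 8
    if b < 0 ∨ (d.length : Int) ≤ b then raw
    else
      let off : Nat := (PySem.Int.mod hi 8).toNat
      let take : Nat := min (off + 1) (r+1)
      let chunk : Int := PySem.Int.mod (PySem.Int.floordiv (PySem.List.pyGetD d b 0) ((1:Int) <<< (off + 1 - take))) ((1:Int) <<< take)
      pvBE_B d (hi - (take : Int)) (r+1-take) (raw * ((1:Int) <<< take) + chunk)
  termination_by _ r _ => r
  decreasing_by
    have h1 := PySem.Int.mod_lt hi (b := 8) (by norm_num)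
    have h2 := PySem.Int.mod_nonneg hi (b := 8) (by norm_num)
    omega

def extract_raw_signal_py_alt (data_bytes : List Int) (start_bit : Int) (length : Int) (byte_order : String) : Int :=
  if length ≤ 0 then 0
  else if byte_order = "little_endian" then pvLE_B data_bytes start_bit length.toNat 0 0
  else pvBE_B data_bytes start_bit length.toNat 0

-- ===== PRECONDITION & SPEC =====
-- Pre_ excludes exactly the inputs where A raises IndexError: in the little_endian branch the very
-- first bit index may give a byte index below -len(data_bytes), which Python indexing rejects.
def Pre_extract_raw_signal_py (data_bytes : List Int) (start_bit : Int) (length : Int) (byte_order : String) : Prop :=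
  byte_order = "little_endian" → (length ≤ 0 ∨ -8 * (data_bytes.length : Int) ≤ start_bit)
instance (data_bytes : List Int) (start_bit : Int) (length : Int) (byte_order : String) : Decidable (Pre_extract_raw_signal_py data_bytes start_bit length byte_order) := by unfold Pre_extract_raw_signal_py; infer_instance

def pvWitness_extract_raw_signal_py : List Int × Int × Int × String := ([18, 52, 255], 3, 10, "little_endian")

def Spec_extract_raw_signal_py (data_bytes : List Int) (start_bit : Int) (length : Int) (byte_order : String) (out : Int) : Prop := out = extract_raw_signal_py_alt data_bytes start_bit length byte_order
instance (data_bytes : List Int) (start_bit : Int) (length : Int) (byte_order : String) (out : Int) : Decidable (Spec_extract_raw_signal_py data_bytes start_bit length byte_order out) := by unfold Spec_extract_raw_signal_py; infer_instance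

-- ===== CLAIM (what is proved, stated in full; the proofs are below) =====
def Claim_equal_extract_raw_signal_py : Prop := ∀ (data_bytes : List Int) (start_bit : Int) (length : Int) (byte_order : String), Dom_extract_raw_signal_py data_bytes start_bit length byte_order → Pre_extract_raw_signal_py data_bytes start_bit length byte_order → Spec_extract_raw_signal_py data_bytes start_bit length byte_order (extract_raw_signal_py data_bytes start_bit length byte_order)


-- ===== LEMMAS AND PROOFS =====

-- general bit-arithmetic facts used to relate the bit-by-bit loop to the chunked loop
theorem pv_nat_or_pow (r i : Nat) (h : r < 2^i) : r ||| 2^i = 2^i + r := by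
  apply Nat.eq_of_testBit_eq
  intro j
  rw [Nat.testBit_lor]
  rcases lt_trichotomy j i with hj | hj | hj
  · rw [Nat.testBit_two_pow_add_gt hj, Nat.testBit_two_pow]
    simp [Nat.ne_of_gt hj]
  · subst hj
    rw [Nat.testBit_two_pow_add_eq, Nat.testBit_lt_two_pow h, Nat.testBit_two_pow]
    simp
  · have h1 : r.testBit j = false := Nat.testBit_lt_two_pow (lt_trans h (Nat.pow_lt_pow_right (by norm_num) hj))
    have h2 : (2^i + r).testBit j = false := by
      apply Nat.testBit_lt_two_pow
      have h3 : 2^i + r < 2^(i+1) := by have := Nat.pow_succ 2 i; omega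
      calc 2^i + r < 2^(i+1) := h3
        _ ≤ 2^j := Nat.pow_le_pow_right (by norm_num) hj
    rw [h1, h2, Nat.testBit_two_pow]
    simp
    omega

theorem pv_nat_or_one (r : Nat) : (2*r) ||| 1 = 2*r + 1 := by
  apply Nat.eq_of_testBit_eq
  intro j
  rw [Nat.testBit_lor]
  cases j with
  | zero => simp [Nat.testBit_zero]
  | succ j =>
      rw [Nat.testBit_succ, Nat.testBit_succ, Nat.testBit_succ]
      have e1 : 2*r/2 = r := by omega
      have e2 : (2*r+1)/2 = r := by omega
      have e3 : (1:Nat)/2 = 0 := by norm_num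
      rw [e1, e2, e3]
      simp

theorem pv_or_bit (raw b : Int) (i : Nat) (h0 : 0 ≤ raw) (h1 : raw < 2^i) (hb : b = 0 ∨ b = 1) :
    PySem.Int.bor raw (b <<< i) = raw + b * 2^i := by
  rcases hb with hb | hb <;> subst hb
  · rw [Int.shiftLeft_eq]
    simp
  · rw [Int.shiftLeft_eq, one_mul]
    rw [PySem.Int.bor_of_nonneg h0 (by positivity)]
    have hp : ((2:Int)^i).toNat = 2^i := by
      rw [show ((2:Int)^i) = ((2^i : Nat) : Int) by push_cast; ring]
      exact Int.toNat_natCast _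
    have hb2 : raw.toNat < 2^i := by
      have : ((2^i : Nat) : Int) = 2^i := by push_cast; ring
      omega
    rw [hp, pv_nat_or_pow raw.toNat i hb2]
    push_cast
    omega

theorem pv_or_even (raw b : Int) (h0 : 0 ≤ raw) (hb : b = 0 ∨ b = 1) :
    PySem.Int.bor (raw <<< (1:Nat)) b = 2*raw + b := by
  rcases hb with hb | hb <;> subst hb
  · rw [Int.shiftLeft_eq]
    simp
    ring
  · rw [Int.shiftLeft_eq]
    rw [PySem.Int.bor_of_nonneg (by positivity) (by norm_num)]
    have h2 : (raw * 2^1).toNat = 2 * raw.toNat := by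
      simp [Int.toNat_mul h0]
      omega
    rw [h2, show ((1:Int)).toNat = 1 from rfl, pv_nat_or_one]
    push_cast
    omega

theorem pv_bit_val (x : Int) (k : Nat) : PySem.Int.band (x >>> k) 1 = (x / 2^k) % 2 := by
  rw [PySem.Int.band_one, PySem.Int.mod_eq_emod_of_pos (by norm_num), Int.shiftRight_eq_div_pow]
  push_cast
  ring_nf

theorem pv_div_div (x : Int) (p q : Nat) : x / 2^p / 2^q = x / 2^(p+q) := by
  rw [Int.ediv_ediv_of_nonneg (by positivity), ← pow_add]

theorem pv_mod_split (y : Int) (k : Nat) : y % (2^(k+1) : Int) = y % 2 + 2 * ((y/2) % 2^k) := by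
  have hdd : y / 2 / 2^k = y / (2 * 2^k) := Int.ediv_ediv_of_nonneg (by norm_num)
  have e1 := Int.mul_ediv_add_emod y 2
  have e2 := Int.mul_ediv_add_emod (y/2) (2^k)
  have e3 := Int.mul_ediv_add_emod y (2 * 2^k)
  have hpow : (2:Int)^(k+1) = 2 * 2^k := by ring
  rw [hpow]
  linear_combination e3 - 2 * e2 - e1 + (2 * 2^k) * hdd

theorem pv_mod_split_hi (y : Int) (k : Nat) : y % (2^(k+1) : Int) = ((y / 2^k) % 2) * 2^k + y % 2^k := by
  have hdd : y / 2^k / 2 = y / (2^k * 2) := Int.ediv_ediv_of_nonneg (by positivity)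
  have e1 := Int.mul_ediv_add_emod y (2^k)
  have e2 := Int.mul_ediv_add_emod (y/2^k) 2
  have e3 := Int.mul_ediv_add_emod y (2^k * 2)
  have hpow : (2:Int)^(k+1) = 2^k * 2 := by ring
  rw [hpow]
  linear_combination e3 - 2^k * e2 - e1 + (2^k * 2) * hdd

theorem pv_one_shift (m : Nat) : ((1:Int) <<< m) = 2^m := by rw [Int.shiftLeft_eq, one_mul]
theorem pv_fd8 (a : Int) : PySem.Int.floordiv a 8 = a / 8 := PySem.Int.floordiv_eq_ediv_of_pos (by norm_num)
theorem pv_md8 (a : Int) : PySem.Int.mod a 8 = a % 8 := PySem.Int.mod_eq_emod_of_pos (by norm_num)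

theorem pv_le_steps (d : List Int) (s : Int) :
    ∀ (k n i : Nat) (raw : Int), k ≤ n →
      ((s + (i:Int)) % 8).toNat + k ≤ 8 →
      (0 < k → (s + (i:Int)) / 8 < (d.length : Int)) →
      0 ≤ raw → raw < 2^i →
      pvLE_A d s n i raw =
        pvLE_A d s (n - k) (i + k)
          (raw + ((PySem.List.pyGetD d ((s + (i:Int)) / 8) 0 / 2^(((s + (i:Int)) % 8).toNat)) % 2^k) * 2^i) := by
  intro k
  induction k with
  | zero =>
      intro n i raw _ _ _ _ _
      simp
  | succ k ih =>
      intro n i raw hkn hoff hbyte h0 h1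
      obtain ⟨m, rfl⟩ : ∃ m, n = m + 1 := ⟨n-1, by omega⟩
      have hlen : (s + (i:Int)) / 8 < (d.length : Int) := hbyte (by omega)
      have hm0 : 0 ≤ (s + (i:Int)) % 8 := Int.emod_nonneg _ (by norm_num)
      have hm8 : (s + (i:Int)) % 8 < 8 := Int.emod_lt_of_pos _ (by norm_num)
      conv_lhs => rw [pvLE_A]
      simp only [pv_fd8, pv_md8]
      rw [if_neg (by omega), pv_bit_val]
      have hbv : (PySem.List.pyGetD d ((s + (i:Int)) / 8) 0 / 2^(((s + (i:Int)) % 8).toNat)) % 2 = 0 ∨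
                 (PySem.List.pyGetD d ((s + (i:Int)) / 8) 0 / 2^(((s + (i:Int)) % 8).toNat)) % 2 = 1 := by omega
      set x := PySem.List.pyGetD d ((s + (i:Int)) / 8) 0 with hx
      set off := ((s + (i:Int)) % 8).toNat with hoffd
      rw [pv_or_bit raw _ i h0 h1 hbv]
      have h2i : (2:Int)^(i+1) = 2 * 2^i := by ring
      have hpowpos : (0:Int) < 2^i := by positivity
      have hbitnn : 0 ≤ (x / 2^off) % 2 := by omega
      rcases Nat.eq_zero_or_pos k with hk0 | hkpos
      · subst hk0
        norm_num
      · -- same byte for the next bit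
        have hoff7 : off + 1 < 8 := by omega
        have hdiv1 : (s + ((i:Int)+1)) / 8 = (s + (i:Int)) / 8 := by omega
        have hmod1 : (s + ((i:Int)+1)) % 8 = (s + (i:Int)) % 8 + 1 := by omega
        have hrw1 : (s + (((i+1):Nat):Int)) = s + ((i:Int)+1) := by push_cast; ring
        have ihs := ih m (i+1) (raw + ((x / 2^off) % 2) * 2^i) (by omega)
          (by rw [hrw1, hmod1]; omega)
          (by intro _; rw [hrw1, hdiv1]; exact hlen)
          (by positivity)
          (by rcases hbv with hb | hb <;> rw [hb] <;> [skip; skip] <;> nlinarith [hpowpos])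
        rw [hrw1, hdiv1, hmod1] at ihs
        have hoffn : ((s + (i:Int)) % 8 + 1).toNat = off + 1 := by omega
        rw [hoffn] at ihs
        rw [ihs]
        have hieq : i + 1 + k = i + (k + 1) := by omega
        have hneq : m - k = m + 1 - (k + 1) := by omega
        rw [hieq, hneq]
        congr 1
        have hdd : x / 2^off / 2 = x / 2^(off+1) := by
          have h := pv_div_div x off 1
          norm_num at h
          exact h
        have hsplit := pv_mod_split (x / 2^off) k
        rw [← hx, ← hdd, h2i, hsplit]
        ring

theorem pv_le_main (d : List Int) (s : Int) :
    ∀ n i (raw : Int), 0 ≤ raw → raw < 2^i →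
      pvLE_A d s n i raw = pvLE_B d (s + (i:Int)) n i raw := by
  intro n
  induction n using Nat.strong_induction_on with
  | _ n ih =>
    intro i raw h0 h1
    match n with
    | 0 => rw [pvLE_A, pvLE_B]
    | m+1 =>
      have hm0 : 0 ≤ (s + (i:Int)) % 8 := Int.emod_nonneg _ (by norm_num)
      have hm8 : (s + (i:Int)) % 8 < 8 := Int.emod_lt_of_pos _ (by norm_num)
      conv_rhs => rw [pvLE_B]
      simp only [pv_fd8, pv_md8, pv_one_shift]
      by_cases hlen : (d.length:Int) ≤ (s + (i:Int)) / 8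
      · rw [if_pos hlen]
        conv_lhs => rw [pvLE_A]
        simp only [pv_fd8, pv_md8]
        rw [if_pos hlen]
      · rw [if_neg hlen]
        set x := PySem.List.pyGetD d ((s + (i:Int)) / 8) 0 with hx
        set off := ((s + (i:Int)) % 8).toNat with hoffd
        set take := min (8 - off) (m+1) with htaked
        have htake1 : 1 ≤ take := by omega
        have htakem : take ≤ m+1 := by omega
        have hofftake : off + take ≤ 8 := by omega
        have hchunk0 : 0 ≤ (x / 2^off) % 2^take := Int.emod_nonneg _ (by positivity)
        have hchunklt : (x / 2^off) % 2^take < 2^take := Int.emod_lt_of_pos _ (by positivity)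
        have hsteps := pv_le_steps d s take (m+1) i raw htakem (by omega)
          (fun _ => by omega) h0 h1
        rw [← hx, ← hoffd] at hsteps
        rw [hsteps]
        have hpows : (2:Int)^(i+take) = 2^i * 2^take := by rw [pow_add]
        have hraw' : raw + (x / 2^off) % 2^take * 2^i < 2^(i+take) := by
          rw [hpows]
          nlinarith [pow_pos (by norm_num : (0:Int) < 2) i]
        have hihs := ih (m+1-take) (by omega) (i+take)
          (raw + (x / 2^off) % 2^take * 2^i)
          (by positivity) hraw'
        have hcast : s + (((i+take):Nat):Int) = s + (i:Int) + (take:Int) := by push_cast; ring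
        rw [hcast] at hihs
        rw [hihs, PySem.Int.floordiv_eq_ediv_of_pos (by positivity), PySem.Int.mod_eq_emod_of_pos (by positivity)]

theorem pv_be_steps (d : List Int) (s : Int) :
    ∀ (k n i : Nat) (raw : Int), k ≤ n →
      k ≤ ((s - (i:Int)) % 8).toNat + 1 →
      (0 < k → 0 ≤ (s - (i:Int)) / 8 ∧ (s - (i:Int)) / 8 < (d.length : Int)) →
      0 ≤ raw →
      pvBE_A d s n i raw =
        pvBE_A d s (n - k) (i + k)
          (raw * 2^k + (PySem.List.pyGetD d ((s - (i:Int)) / 8) 0 / 2^(((s - (i:Int)) % 8).toNat + 1 - k)) % 2^k) := by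
  intro k
  induction k with
  | zero =>
      intro n i raw _ _ _ _
      simp
  | succ k ih =>
      intro n i raw hkn hoff hbyte h0
      obtain ⟨m, rfl⟩ : ∃ m, n = m + 1 := ⟨n-1, by omega⟩
      obtain ⟨hb0, hblen⟩ := hbyte (by omega)
      have hm0 : 0 ≤ (s - (i:Int)) % 8 := Int.emod_nonneg _ (by norm_num)
      have hm8 : (s - (i:Int)) % 8 < 8 := Int.emod_lt_of_pos _ (by norm_num)
      conv_lhs => rw [pvBE_A]
      simp only [pv_fd8, pv_md8]
      rw [if_neg (by omega), pv_bit_val]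
      have hbv : (PySem.List.pyGetD d ((s - (i:Int)) / 8) 0 / 2^(((s - (i:Int)) % 8).toNat)) % 2 = 0 ∨
                 (PySem.List.pyGetD d ((s - (i:Int)) / 8) 0 / 2^(((s - (i:Int)) % 8).toNat)) % 2 = 1 := by omega
      set x := PySem.List.pyGetD d ((s - (i:Int)) / 8) 0 with hx
      set off := ((s - (i:Int)) % 8).toNat with hoffd
      rw [pv_or_even raw _ h0 hbv]
      rcases Nat.eq_zero_or_pos k with hk0 | hkpos
      · subst hk0
        norm_num
        ring_nf
      · have hkoff : k ≤ off := by omega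
        have hoffpos : 1 ≤ off := by omega
        have hdiv1 : (s - ((i:Int)+1)) / 8 = (s - (i:Int)) / 8 := by omega
        have hmod1 : (s - ((i:Int)+1)) % 8 = (s - (i:Int)) % 8 - 1 := by omega
        have hrw1 : (s - (((i+1):Nat):Int)) = s - ((i:Int)+1) := by push_cast; ring
        have ihs := ih m (i+1) (2*raw + (x / 2^off) % 2) (by omega)
          (by rw [hrw1, hmod1]; omega)
          (by intro _; rw [hrw1, hdiv1]; exact ⟨hb0, hblen⟩)
          (by rcases hbv with hb | hb <;> omega)
        rw [hrw1, hdiv1, hmod1] at ihs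
        have hoffn : ((s - (i:Int)) % 8 - 1).toNat = off - 1 := by omega
        rw [hoffn] at ihs
        rw [ihs]
        have hieq : i + 1 + k = i + (k + 1) := by omega
        have hneq : m - k = m + 1 - (k + 1) := by omega
        rw [hieq, hneq]
        congr 1
        have hexp1 : off - 1 + 1 - k = off - k := by omega
        have hexp2 : off + 1 - (k + 1) = off - k := by omega
        rw [hexp1, hexp2, ← hx]
        have hdd : x / 2^(off-k) / 2^k = x / 2^off := by
          rw [pv_div_div]
          have he : off - k + k = off := by omega
          rw [he]
        have hsplit := pv_mod_split_hi (x / 2^(off-k)) k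
        rw [hdd] at hsplit
        rw [hsplit]
        ring

theorem pv_be_main (d : List Int) (s : Int) :
    ∀ n i (raw : Int), 0 ≤ raw →
      pvBE_A d s n i raw = pvBE_B d (s - (i:Int)) n raw := by
  intro n
  induction n using Nat.strong_induction_on with
  | _ n ih =>
    intro i raw h0
    match n with
    | 0 => rw [pvBE_A, pvBE_B]
    | m+1 =>
      have hm0 : 0 ≤ (s - (i:Int)) % 8 := Int.emod_nonneg _ (by norm_num)
      have hm8 : (s - (i:Int)) % 8 < 8 := Int.emod_lt_of_pos _ (by norm_num)
      conv_rhs => rw [pvBE_B]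
      simp only [pv_fd8, pv_md8, pv_one_shift]
      by_cases hbrk : (s - (i:Int)) / 8 < 0 ∨ (d.length:Int) ≤ (s - (i:Int)) / 8
      · rw [if_pos hbrk]
        conv_lhs => rw [pvBE_A]
        simp only [pv_fd8, pv_md8]
        rw [if_pos hbrk]
      · rw [if_neg hbrk]
        have hb0 : 0 ≤ (s - (i:Int)) / 8 := by omega
        have hblen : (s - (i:Int)) / 8 < (d.length:Int) := by omega
        set x := PySem.List.pyGetD d ((s - (i:Int)) / 8) 0 with hx
        set off := ((s - (i:Int)) % 8).toNat with hoffd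
        set take := min (off + 1) (m+1) with htaked
        have htake1 : 1 ≤ take := by omega
        have htakem : take ≤ m+1 := by omega
        have htakeoff : take ≤ off + 1 := by omega
        have hsteps := pv_be_steps d s take (m+1) i raw htakem (by omega)
          (fun _ => ⟨by omega, by omega⟩) h0
        rw [← hx, ← hoffd] at hsteps
        rw [hsteps]
        have hchunk0 : 0 ≤ (x / 2^(off+1-take)) % 2^take := Int.emod_nonneg _ (by positivity)
        have hihs := ih (m+1-take) (by omega) (i+take)
          (raw * 2^take + (x / 2^(off+1-take)) % 2^take)
          (by positivity)
        have hcast : s - (((i+take):Nat):Int) = s - (i:Int) - (take:Int) := by push_cast; ring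
        rw [hcast] at hihs
        rw [hihs, PySem.Int.floordiv_eq_ediv_of_pos (by positivity), PySem.Int.mod_eq_emod_of_pos (by positivity)]

-- ===== VERDICT (by name: the statement is the Claim_ definition above) =====
theorem extract_raw_signal_py_spec : Claim_equal_extract_raw_signal_py := by
  intro d s L bo _ _
  unfold Spec_extract_raw_signal_py extract_raw_signal_py extract_raw_signal_py_alt
  split
  · rfl
  · split
    · simpa using pv_le_main d s L.toNat 0 0 le_rfl (by norm_num)
    · simpa using pv_be_main d s L.toNat 0 0 le_rfl
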